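-- pv_equiv track=rewrite | github.com/LucasBitello/footxap | api/regras/iaUteisRegras.py | obter_k_folds_temporal
-- ===== SOURCE A (Python) =====
-- def obter_k_folds_temporal(arrDados: list, n_folds: int):
--     tamanho_fold = len(arrDados) // n_folds
--     folds = []
--
--     for i in range(n_folds):
--         inicio = i * tamanho_fold
--         fim = (i + 1) * tamanho_fold if i < n_folds - 1 else len(arrDados)
--         fold = arrDados[inicio:fim]
--         folds.append(fold)
--
--     return folds
-- ===== SOURCE B (Python) =====
-- def obter_k_folds_temporal(arrDados: list, n_folds: int):
--     tamanho_fold = len(arrDados) // n_folds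
--     folds = []
--     rest = arrDados
--     k = n_folds
--     while k > 0:
--         if k == 1:
--             folds.append(rest)
--         else:
--             folds.append(rest[:tamanho_fold])
--             rest = rest[tamanho_fold:]
--         k -= 1
--     return folds
-- ===== Notes on version B (the rewrite author's own statement) =====
-- stated objective: alternative
-- what changed: B maintains a shrinking remainder of the list and peels the first tamanho_fold elements off it at each step (the countdown's final fold taking the whole remainder), instead of A's index loop that slices the original list with recomputed inicio/fim absolute bounds.
import Mathlib
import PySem

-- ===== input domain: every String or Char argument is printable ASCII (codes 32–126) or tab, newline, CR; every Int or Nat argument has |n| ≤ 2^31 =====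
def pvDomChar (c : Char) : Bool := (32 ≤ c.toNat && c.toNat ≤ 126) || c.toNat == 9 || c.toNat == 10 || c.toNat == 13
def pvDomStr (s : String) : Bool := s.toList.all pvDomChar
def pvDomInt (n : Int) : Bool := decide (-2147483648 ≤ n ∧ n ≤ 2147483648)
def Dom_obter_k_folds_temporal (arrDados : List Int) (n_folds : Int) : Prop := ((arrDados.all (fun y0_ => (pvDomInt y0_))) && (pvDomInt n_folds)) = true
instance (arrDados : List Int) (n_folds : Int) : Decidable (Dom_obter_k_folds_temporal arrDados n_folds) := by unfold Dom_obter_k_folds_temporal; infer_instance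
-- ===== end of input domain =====

-- B keeps a shrinking remainder and peels its first tamanho_fold elements off per step (the final
-- fold taking the whole remainder), instead of A's index loop slicing the original list with
-- recomputed inicio/fim absolute bounds; equivalence proved on n_folds ≠ 0.

-- ===== PORT A =====
def obter_k_folds_temporal (arrDados : List Int) (n_folds : Int) : List (List Int) :=
  let tamanho_fold : Int := PySem.Int.floordiv (arrDados.length : Int) n_folds
  (PySem.List.pyRange 0 n_folds 1).foldl
    (fun folds i =>
      let inicio := i * tamanho_fold
      let fim := if i < n_folds - 1 then (i + 1) * tamanho_fold else (arrDados.length : Int)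
      folds ++ [PySem.List.slice arrDados (some inicio) (some fim)])
    []

-- ===== PORT B =====
-- Source B's while loop: state (folds, rest, k); peels rest[:tamanho_fold] per step, k counts down
def pvPeelLoop (tamanho_fold : Int) (folds : List (List Int)) (rest : List Int) (k : Int) :
    List (List Int) :=
  if 0 < k then
    if k = 1 then pvPeelLoop tamanho_fold (folds ++ [rest]) rest (k - 1)
    else pvPeelLoop tamanho_fold (folds ++ [PySem.List.slice rest none (some tamanho_fold)])
          (PySem.List.slice rest (some tamanho_fold) none) (k - 1)
  else folds
termination_by k.toNat
decreasing_by all_goals omega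

def obter_k_folds_temporal_alt (arrDados : List Int) (n_folds : Int) : List (List Int) :=
  let tamanho_fold : Int := PySem.Int.floordiv (arrDados.length : Int) n_folds
  pvPeelLoop tamanho_fold [] arrDados n_folds

-- ===== PRECONDITION & SPEC =====
-- Pre_ excludes exactly n_folds = 0, where Python A raises ZeroDivisionError.
def Pre_obter_k_folds_temporal (_arrDados : List Int) (n_folds : Int) : Prop := n_folds ≠ 0
instance (arrDados : List Int) (n_folds : Int) : Decidable (Pre_obter_k_folds_temporal arrDados n_folds) := by unfold Pre_obter_k_folds_temporal; infer_instance

def pvWitness_obter_k_folds_temporal : List Int × Int := ([1, 2, 3, 4, 5], 2)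

def Spec_obter_k_folds_temporal (arrDados : List Int) (n_folds : Int) (out : List (List Int)) : Prop := out = obter_k_folds_temporal_alt arrDados n_folds
instance (arrDados : List Int) (n_folds : Int) (out : List (List Int)) : Decidable (Spec_obter_k_folds_temporal arrDados n_folds out) := by unfold Spec_obter_k_folds_temporal; infer_instance

-- ===== CLAIM (what is proved, stated in full; the proofs are below) =====
def Claim_equal_obter_k_folds_temporal : Prop := ∀ (arrDados : List Int) (n_folds : Int), Dom_obter_k_folds_temporal arrDados n_folds → Pre_obter_k_folds_temporal arrDados n_folds → Spec_obter_k_folds_temporal arrDados n_folds (obter_k_folds_temporal arrDados n_folds)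

-- ===== LEMMAS AND PROOFS =====

-- proof-side recursive view of the loop
def pvPeel (tamanho_fold : Int) (rest : List Int) (k : Int) : List (List Int) :=
  if k ≤ 0 then []
  else if k = 1 then [rest]
  else PySem.List.slice rest none (some tamanho_fold)
        :: pvPeel tamanho_fold (PySem.List.slice rest (some tamanho_fold) none) (k - 1)
termination_by k.toNat
decreasing_by omega

theorem pvPeelLoop_eq (t : Int) : ∀ (kN : Nat) (k : Int), k.toNat = kN →
    ∀ (folds : List (List Int)) (rest : List Int),
      pvPeelLoop t folds rest k = folds ++ pvPeel t rest k := by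
  intro kN
  induction kN with
  | zero =>
    intro k hk folds rest
    rw [pvPeelLoop, pvPeel, if_neg (by omega), if_pos (by omega)]
    simp
  | succ m ih =>
    intro k hk folds rest
    have hkpos : 0 < k := by omega
    by_cases h1 : k = 1
    · subst h1
      rw [pvPeelLoop, pvPeel]
      rw [if_pos (by omega : (0:Int) < 1), if_pos rfl, if_neg (by omega : ¬ (1:Int) ≤ 0),
        if_pos rfl]
      rw [pvPeelLoop, if_neg (by omega : ¬ (0:Int) < 1 - 1)]
    · rw [pvPeelLoop, pvPeel]
      rw [if_pos hkpos, if_neg (by omega : ¬ k ≤ 0), if_neg h1, if_neg h1,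
        ih (k - 1) (by omega)]
      simp

-- B characterization: peel yields take/drop folds at multiples of t (t ≥ 0, k ≥ 1).
theorem pvPeel_char (t : Int) (ht : 0 ≤ t) :
    ∀ (kN : Nat) (rest : List Int), 1 ≤ kN →
      pvPeel t rest (kN : Int) =
        (List.range kN).map (fun i =>
          if i + 1 < kN then (rest.drop (i * t.toNat)).take t.toNat
          else rest.drop (i * t.toNat)) := by
  intro kN
  induction kN with
  | zero => intro rest h; omega
  | succ m ih =>
    intro rest _
    rcases Nat.eq_zero_or_pos m with hm | hm
    · subst hm
      rw [pvPeel]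
      simp
    · rw [pvPeel]
      rw [if_neg (by omega), if_neg (by omega)]
      have h1 : ((m : Int) + 1 - 1) = (m : Int) := by ring
      have : ((m + 1 : Nat) : Int) - 1 = (m : Int) := by push_cast; ring
      rw [this, ih _ hm]
      rw [PySem.List.slice_to _ ht, PySem.List.slice_from _ ht]
      rw [List.range_succ_eq_map]
      simp only [List.map_cons, List.map_map]
      congr 1
      · simp
        omega
      · apply List.map_congr_left
        intro i hi
        have hi' : i < m := List.mem_range.mp hi
        simp only [Function.comp]
        have hd : (rest.drop t.toNat).drop (i * t.toNat) = rest.drop ((i + 1) * t.toNat) := by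
          rw [List.drop_drop]; congr 1; ring
        by_cases hc : i + 1 + 1 < m + 1
        · rw [if_pos hc, if_pos (by omega), hd]
        · rw [if_neg hc, if_neg (by omega), hd]

-- A characterization: the foldl over range(n) yields the same take/drop folds.
theorem portA_char (arr : List Int) (n : Int) (hn : 1 ≤ n) :
    obter_k_folds_temporal arr n =
      (List.range n.toNat).map (fun i =>
        if i + 1 < n.toNat then
          (arr.drop (i * (PySem.Int.floordiv (arr.length : Int) n).toNat)).take
            (PySem.Int.floordiv (arr.length : Int) n).toNat
        else arr.drop (i * (PySem.Int.floordiv (arr.length : Int) n).toNat)) := by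
  unfold obter_k_folds_temporal
  set t : Int := PySem.Int.floordiv (arr.length : Int) n with htdef
  have ht : 0 ≤ t := by
    rw [htdef]
    exact PySem.Int.floordiv_nonneg (by positivity) (by omega)
  have htmul : t * n ≤ (arr.length : Int) := by
    rw [htdef]
    exact (PySem.Int.le_floordiv_iff_mul_le (by omega)).mp le_rfl
  rw [PySem.List.foldl_append_singleton_eq_map, PySem.List.pyRange_one]
  simp only [Int.sub_zero, List.map_map, List.nil_append]
  apply List.map_congr_left
  intro i hi
  have hi' : i < n.toNat := List.mem_range.mp hi
  simp only [Function.comp, zero_add]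
  by_cases hc : i + 1 < n.toNat
  · rw [if_pos (by omega : (i : Int) < n - 1), if_pos hc]
    have e1 : (i : Int) * t = ((i * t.toNat : Nat) : Int) := by
      push_cast; rw [Int.toNat_of_nonneg ht]
    have e2 : ((i : Int) + 1) * t = ((i * t.toNat : Nat) : Int) + ((t.toNat : Nat) : Int) := by
      push_cast; rw [Int.toNat_of_nonneg ht]; ring
    rw [e1, e2, PySem.List.slice_natCast_add]
  · rw [if_neg (by omega : ¬ (i : Int) < n - 1), if_neg hc]
    have e1 : (i : Int) * t = ((i * t.toNat : Nat) : Int) := by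
      push_cast; rw [Int.toNat_of_nonneg ht]
    rw [e1]
    have : PySem.List.slice arr (some ((i * t.toNat : Nat) : Int)) (some (arr.length : Int))
        = arr.drop (i * t.toNat) := by
      rw [PySem.List.slice_natCast]
      apply List.take_of_length_le
      simp
    exact this

theorem obter_k_folds_eq (arr : List Int) (n : Int) (hn : n ≠ 0) :
    obter_k_folds_temporal arr n = obter_k_folds_temporal_alt arr n := by
  unfold obter_k_folds_temporal_alt
  rw [pvPeelLoop_eq _ n.toNat n rfl]
  simp only [List.nil_append]
  rcases lt_or_gt_of_ne hn with hneg | hpos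
  · -- n < 0 : A's range is empty, B's peel returns []
    unfold obter_k_folds_temporal
    rw [pvPeel]
    rw [if_pos (by omega)]
    have h0 : (n - 0).toNat = 0 := by omega
    simp only [PySem.List.pyRange_one, h0, List.range_zero, List.map_nil, List.foldl_nil]
  · have hn1 : 1 ≤ n := hpos
    set t : Int := PySem.Int.floordiv (arr.length : Int) n with htdef
    have ht : 0 ≤ t := by
      rw [htdef]
      exact PySem.Int.floordiv_nonneg (by positivity) (by omega)
    have hk : ((n.toNat : Int)) = n := Int.toNat_of_nonneg (by omega)
    have hB := pvPeel_char t ht n.toNat arr (by omega)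
    rw [hk] at hB
    rw [portA_char arr n hn1, ← htdef]
    exact hB.symm

-- ===== VERDICT (by name: the statement is the Claim_ definition above) =====
theorem obter_k_folds_temporal_spec : Claim_equal_obter_k_folds_temporal := by
  intro arrDados n_folds _ hpre
  unfold Spec_obter_k_folds_temporal
  exact obter_k_folds_eq arrDados n_folds hpre
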